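-- pv_equiv track=rewrite | github.com/pyrustic/jesth | jesth/misc/__init__.py | tidy_up_float
-- ===== SOURCE A (Python) =====
-- from collections import namedtuple
--
-- def tidy_up_float(s, width=3):
--     """Tidy up a float number (str or float or decimal.Decimal)
--     Example: 3.141234 -> 3.141_234
--     """
--     s = s if isinstance(s, str) else str(s)
--     # make sure that s isn't "nan", "inf", "-inf", "infinity", ...
--     for char in s:
--         if char not in ("-01234.56789+eE"):
--             return s
--     info = parse_float(s)
--     tidy_left_mantissa = tidy_up_int(info.left_mantissa)
--     tidy_right_mantissa = ""
--     if info.right_mantissa: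
--         cache = _tidy_up_right_mantissa(info.right_mantissa, width)
--         tidy_right_mantissa = "." + cache
--     tidy_exponent = "E" + info.exponent if info.exponent else ""
--     result = tidy_left_mantissa + tidy_right_mantissa + tidy_exponent
--     return result
--
-- def _tidy_up_right_mantissa(s, width):
--     if not s:
--         return ""
--     cache = list()
--     group = list()
--     i = 0
--     for char in s:
--         if i == width:
--             cache.append("".join(group))
--             group = list()
--             i = 0
--         group.append(char)
--         i += 1
--     if group:
--         cache.append("".join(group))
--     return "_".join(cache)
--
-- def tidy_up_int(s, width=3):
--     """Tidy up some int number (str or int)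
--     Example: 300141234 -> 300_141_234
--     """
--     s = s if isinstance(s, str) else str(s)
--     tidy = list()
--     is_negative = True if s[0] == "-" else False
--     s = s.lstrip("+-")
--     group = list()
--     i = 0
--     for char in reversed(s):
--         if i == width:
--             tidy.insert(0, "".join(group))
--             group = list()
--             i = 0
--         group.insert(0, char)
--         i += 1
--     if group:
--         tidy.insert(0, "".join(group))
--     tidy = "_".join(tidy)
--     result = "-" + tidy if is_negative else tidy
--     return result
--
-- FloatParts = namedtuple("FloatParts", ["left_mantissa", "right_mantissa", "exponent"])
--
-- def parse_float(s):
--     """Parse a float number (string or decimal.Decimal or float), returns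
--     an instance of this namedtuple:
--     FloatParts = namedtuple("FloatParts", ["left_mantissa", "right_mantissa", "exponent"])"""
--     s = _prepare_float(s)
--     # Split s at the exponent separator
--     parts = s.split("E", 1)
--     mantissa = parts[0]
--     exponent = parts[1] if len(parts) == 2 else ""
--     exponent = (exponent[1:] if exponent and exponent[0] == "+"
--                 else exponent)
--     # Split mantissa at the dot separator
--     left_mantissa, right_mantissa = _parse_mantissa(mantissa)
--     # Return the named tuple
--     return FloatParts(left_mantissa=left_mantissa, right_mantissa=right_mantissa, exponent=exponent)
--
-- def _prepare_float(s):
--     if not isinstance(s, str):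
--         s = str(s)
--     # Remove underscores, whitespaces, upper e
--     cache = list()
--     for c in s:
--         if c in ("_", " "):
--             continue
--         if c == "e":
--             c = "E"
--         cache.append(c)
--     return "".join(cache)
--
-- def _parse_mantissa(s):
--     parts = s.split(".", 1)
--     left_mantissa = parts[0]
--     right_mantissa = parts[1] if len(parts) == 2 else ""
--     return left_mantissa, right_mantissa
-- ===== SOURCE B (Python) =====
-- def tidy_up_float(s, width=3):
--     """Tidy up a float number: slice-based digit grouping instead of
--     char-by-char reversed accumulation."""
--     s = s if isinstance(s, str) else str(s)
--     allowed = set("-01234.56789+eE")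
--     if any(c not in allowed for c in s):
--         return s
--     mantissa, _, exponent = s.replace("e", "E").partition("E")
--     if exponent[:1] == "+":
--         exponent = exponent[1:]
--     left, _, right = mantissa.partition(".")
--     sign = "-" if left[0] == "-" else ""
--     digits = left.lstrip("+-")
--     r = len(digits) % 3
--     head = [digits[:r]] if r else []
--     out = sign + "_".join(head + _chunks(digits[r:], 3))
--     if right:
--         out += "." + "_".join(_chunks(right, width))
--     if exponent:
--         out += "E" + exponent
--     return out
--
-- def _chunks(s, width):
--     if not s:
--         return []
--     return [s[:width]] + _chunks(s[width:], width)
-- ===== Notes on version B (the rewrite author's own statement) =====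
-- stated objective: simpler
-- what changed: A builds digit groups char-by-char with reversed iteration, a counter and insert(0) plus split()-based parsing; B computes the group boundaries arithmetically (length mod 3 head + slice-based chunk recursion) and parses with partition/lstrip, replacing both accumulation loops.
-- outside the precondition, e.g. on tidy_up_float('1.5', 0): A returns '1._5', B raises RecursionError; on tidy_up_float('1.5', -1): A returns '1.5', B raises RecursionError; on tidy_up_float('.5', 3): A raises IndexError, B raises IndexError
import Mathlib
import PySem

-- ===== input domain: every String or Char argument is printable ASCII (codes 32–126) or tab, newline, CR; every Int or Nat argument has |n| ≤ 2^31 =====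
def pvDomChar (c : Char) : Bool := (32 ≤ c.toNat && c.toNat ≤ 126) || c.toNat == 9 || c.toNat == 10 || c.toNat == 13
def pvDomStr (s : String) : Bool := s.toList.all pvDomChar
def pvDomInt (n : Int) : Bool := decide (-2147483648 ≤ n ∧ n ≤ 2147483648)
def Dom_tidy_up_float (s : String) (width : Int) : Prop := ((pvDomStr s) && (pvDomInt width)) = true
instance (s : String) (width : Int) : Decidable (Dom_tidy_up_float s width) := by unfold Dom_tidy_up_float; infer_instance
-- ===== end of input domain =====

-- B replaces A's char-by-char reversed/counter grouping loops by arithmetic slicing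
-- (length-mod head + structural chunk recursion); objective: simpler. Return values only.

-- the character whitelist "-01234.56789+eE" of A's early-return scan (shared literal of both Pythons)
def pvWL : List Char := ['-', '0', '1', '2', '3', '4', '.', '5', '6', '7', '8', '9', '+', 'e', 'E']

-- ===== PORT A =====

-- _prepare_float's loop: skip '_'/' ', map 'e' to 'E'
def aPrep : List Char → List Char
  | [] => []
  | c :: r => if c = '_' ∨ c = ' ' then aPrep r else (if c = 'e' then 'E' else c) :: aPrep r

-- loop body of _tidy_up_right_mantissa (state: cache, group, i)
def fstep (w : Int) (st : List (List Char) × List Char × Int) (c : Char) :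
    List (List Char) × List Char × Int :=
  if st.2.2 = w then (st.1 ++ [st.2.1], [c], 1) else (st.1, st.2.1 ++ [c], st.2.2 + 1)

def aRight (rm : List Char) (w : Int) : List Char :=
  if rm = [] then []
  else
    let st := rm.foldl (fstep w) ([], [], 0)
    let cache := if st.2.1 ≠ [] then st.1 ++ [st.2.1] else st.1
    PySem.Chars.join ['_'] cache

-- loop body of tidy_up_int (iterates over reversed(s); insert(0,·) = prepend)
def rstep (st : List (List Char) × List Char × Int) (c : Char) :
    List (List Char) × List Char × Int :=
  if st.2.2 = 3 then (st.2.1 :: st.1, [c], 1) else (st.1, c :: st.2.1, st.2.2 + 1)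

-- tidy_up_int with its default width 3 (A calls it with the default).
-- s[0] raises IndexError on empty input: excluded by Pre_; headD is exact elsewhere.
-- s.lstrip("+-") ported by hand as dropWhile (exact: strips leading '+'/'-' only).
def aTidyInt (d : List Char) : List Char :=
  let neg := d.headD ' ' = '-'
  let d2 := d.dropWhile (fun c => c = '+' ∨ c = '-')
  let st := d2.reverse.foldl rstep ([], [], 0)
  let tidy := if st.2.1 ≠ [] then st.2.1 :: st.1 else st.1
  let j := PySem.Chars.join ['_'] tidy
  if neg then '-' :: j else j

def tidy_up_float (s : String) (width : Int) : String :=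
  let t := s.toList
  -- for char in s: if char not in "-01234.56789+eE": return s
  if t.any (fun c => ¬ (c ∈ pvWL)) then s
  else
    let p := aPrep t
    let parts := PySem.Chars.splitOnMax p ['E'] 1       -- s.split("E", 1)
    let mantissa := parts.headD []
    let exponent := if parts.length = 2 then parts.getD 1 [] else []
    -- exponent[1:] if exponent and exponent[0] == "+" else exponent
    let exponent := if exponent ≠ [] ∧ exponent.headD ' ' = '+' then exponent.drop 1 else exponent
    let mparts := PySem.Chars.splitOnMax mantissa ['.'] 1  -- mantissa.split(".", 1)
    let lm := mparts.headD []
    let rm := if mparts.length = 2 then mparts.getD 1 [] else []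
    let tl := aTidyInt lm
    let tr := if rm ≠ [] then '.' :: aRight rm width else []
    let te := if exponent ≠ [] then 'E' :: exponent else []
    String.ofList (tl ++ tr ++ te)

-- ===== PORT B =====

def eToE (c : Char) : Char := if c = 'e' then 'E' else c

-- _chunks: structural recursion on slices; fuel = len+1 suffices for width ≥ 1
-- (Python recurses forever for width ≤ 0: outside Pre_)
def bChunks (fuel : Nat) (l : List Char) (w : Int) : List (List Char) :=
  match fuel with
  | 0 => []
  | f + 1 =>
    if l = [] then []
    else PySem.List.slice l none (some w) :: bChunks f (PySem.List.slice l (some w) none) w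

def tidy_up_float_alt (s : String) (width : Int) : String :=
  let t := s.toList
  if t.any (fun c => ¬ (c ∈ pvWL)) then s                -- any(c not in allowed for c in s)
  else
    let u := t.map eToE                                  -- s.replace("e", "E")
    let mantissa := u.takeWhile (fun c => c ≠ 'E')       -- .partition("E"): before / after first 'E'
    let exponent := (u.dropWhile (fun c => c ≠ 'E')).drop 1
    let exponent := if exponent.take 1 = ['+'] then exponent.drop 1 else exponent
    let left := mantissa.takeWhile (fun c => c ≠ '.')    -- .partition(".")
    let right := (mantissa.dropWhile (fun c => c ≠ '.')).drop 1
    let sign : List Char := if left.headD ' ' = '-' then ['-'] else []  -- left[0]: IndexError on empty left, outside Pre_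
    let digits := left.dropWhile (fun c => c = '+' ∨ c = '-')           -- left.lstrip("+-"), exact
    let r := digits.length % 3
    let head : List (List Char) := if r ≠ 0 then [digits.take r] else []  -- digits[:r]
    let out := sign ++ PySem.Chars.join ['_'] (head ++ bChunks (digits.length + 1) (digits.drop r) 3)
    let out := out ++ (if right ≠ [] then '.' :: PySem.Chars.join ['_'] (bChunks (right.length + 1) right width) else [])
    let out := out ++ (if exponent ≠ [] then 'E' :: exponent else [])
    String.ofList out

-- ===== PRECONDITION & SPEC =====
-- Pre_ excludes (a) inputs on which A raises IndexError (whitelist-only strings whose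
-- integer part before any dot or exponent marker is empty, e.g. ".5" or the empty string),
-- and (b) width ≤ 0 with a nonempty fractional part, where A's grouping (a spurious leading
-- separator for width 0, no grouping for negative width) is an accident of its loop counter
-- and B's slice recursion does not terminate.
def Pre_tidy_up_float (s : String) (width : Int) : Prop :=
  ((s.toList.any (fun c => ¬ (c ∈ pvWL))) = true) ∨
  ((s.toList ≠ [] ∧ s.toList.headD ' ' ≠ '.' ∧ s.toList.headD ' ' ≠ 'E' ∧ s.toList.headD ' ' ≠ 'e') ∧
   (1 ≤ width ∨
    (((s.toList.takeWhile (fun c => c ≠ 'E' ∧ c ≠ 'e')).dropWhile (fun c => c ≠ '.')).drop 1) = []))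
instance (s : String) (width : Int) : Decidable (Pre_tidy_up_float s width) := by
  unfold Pre_tidy_up_float; infer_instance

def pvWitness_tidy_up_float : String × Int := ("-12.345", 2)

def Spec_tidy_up_float (s : String) (width : Int) (out : String) : Prop := out = tidy_up_float_alt s width
instance (s : String) (width : Int) (out : String) : Decidable (Spec_tidy_up_float s width out) := by
  unfold Spec_tidy_up_float; infer_instance

-- ===== CLAIM (what is proved, stated in full; the proofs are below) =====
def Claim_equal_tidy_up_float : Prop := ∀ (s : String) (width : Int), Dom_tidy_up_float s width → Pre_tidy_up_float s width → Spec_tidy_up_float s width (tidy_up_float s width)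

-- ===== LEMMAS AND PROOFS =====

-- proof-side reference chunking: forward groups of width w+1
def chunks1 (w : Nat) : List Char → List (List Char)
  | [] => []
  | c :: r => ((c :: r).take (w + 1)) :: chunks1 w ((c :: r).drop (w + 1))
termination_by l => l.length
decreasing_by simp

-- proof-side reference: grouping from the right into blocks of 3
def rchunks (m : List Char) : List (List Char) :=
  if m = [] then []
  else if m.length ≤ 3 then [m]
  else rchunks (m.take (m.length - 3)) ++ [m.drop (m.length - 3)]
termination_by m.length
decreasing_by simp; omega

theorem chunks1_ne (w : Nat) (m : List Char) (h : m ≠ []) :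
    chunks1 w m = m.take (w + 1) :: chunks1 w (m.drop (w + 1)) := by
  cases m with
  | nil => exact absurd rfl h
  | cons c r => rw [chunks1.eq_def]

theorem prep_eq (t : List Char) (h : ∀ c ∈ t, c ∈ pvWL) : aPrep t = t.map eToE := by
  induction t with
  | nil => rfl
  | cons c r ih =>
    have hc := h c (by simp)
    have hne : ¬ (c = '_' ∨ c = ' ') := by
      rintro (rfl | rfl) <;> simp [pvWL] at hc
    simp [aPrep, hne, eToE, ih (fun x hx => h x (by simp [hx]))]

theorem go0 (e : Char) (fuel : Nat) (l cur : List Char) (acc : List (List Char)) :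
    PySem.Chars.splitOnMax.go [e] fuel 0 l cur acc = ((cur.reverse ++ l) :: acc).reverse := by
  cases fuel with
  | zero => rw [PySem.Chars.splitOnMax.go.eq_def]
  | succ f => cases l with
    | nil => rw [PySem.Chars.splitOnMax.go.eq_def]; simp
    | cons c r => rw [PySem.Chars.splitOnMax.go.eq_def]; simp

theorem goE (e : Char) : ∀ (fuel : Nat) (l cur : List Char) (acc : List (List Char)),
    l.length < fuel →
    PySem.Chars.splitOnMax.go [e] fuel 1 l cur acc =
      acc.reverse ++ (if e ∈ l then [cur.reverse ++ l.takeWhile (fun c => c ≠ e), (l.dropWhile (fun c => c ≠ e)).drop 1]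
        else [cur.reverse ++ l]) := by
  intro fuel
  induction fuel with
  | zero => intro l cur acc h; simp at h
  | succ f ih =>
    intro l cur acc h
    cases l with
    | nil => rw [PySem.Chars.splitOnMax.go.eq_def]; simp
    | cons c rest =>
      rw [PySem.Chars.splitOnMax.go.eq_def]
      by_cases hce : c = e
      · subst hce
        simp [List.isPrefixOf, go0]
      · simp only [List.isPrefixOf, List.length_cons] at h ⊢
        simp [hce, ih rest (c :: cur) acc (by simp at h; omega), Ne.symm hce, List.append_assoc]

theorem splitE (e : Char) (l : List Char) :
    PySem.Chars.splitOnMax l [e] 1 =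
      if e ∈ l then [l.takeWhile (fun c => c ≠ e), (l.dropWhile (fun c => c ≠ e)).drop 1]
      else [l] := by
  rw [PySem.Chars.splitOnMax]
  rw [if_neg (by omega)]
  simpa using goE e (l.length + 1) l [] [] (by omega)

theorem fwd_aux (W : Int) (hW : 1 ≤ W) :
    ∀ (l g : List Char) (cache : List (List Char)), g ≠ [] → g.length ≤ W.toNat →
    (if (l.foldl (fstep W) (cache, g, (g.length : Int))).2.1 ≠ [] then
        (l.foldl (fstep W) (cache, g, (g.length : Int))).1 ++ [(l.foldl (fstep W) (cache, g, (g.length : Int))).2.1]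
      else (l.foldl (fstep W) (cache, g, (g.length : Int))).1) = cache ++ chunks1 (W.toNat - 1) (g ++ l) := by
  intro l
  induction l with
  | nil =>
    intro g cache hg hgw
    have h1 : W.toNat - 1 + 1 = W.toNat := by omega
    simp only [List.foldl_nil, List.append_nil]
    rw [chunks1_ne _ _ hg, h1, List.take_of_length_le hgw, List.drop_of_length_le hgw]
    simp [hg, chunks1]
  | cons c l ih =>
    intro g cache hg hgw
    by_cases hfull : g.length = W.toNat
    · have hc : ((g.length : Int)) = W := by omega
      have hstep : fstep W (cache, g, (g.length : Int)) c = (cache ++ [g], [c], 1) := by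
        simp [fstep, hc]
      have h2 := ih [c] (cache ++ [g]) (by simp) (by simp; omega)
      simp only [List.length_cons, List.length_nil] at h2
      push_cast at h2
      simp only [List.foldl_cons, hstep]
      rw [h2]
      rw [chunks1_ne _ (g ++ c :: l) (by simp)]
      have h4 : W.toNat - 1 + 1 = g.length := by omega
      rw [h4, List.take_left, List.drop_left]
      simp
    · have hlt : g.length < W.toNat := by omega
      have hc : ¬ ((g.length : Int) = W) := by omega
      have hstep : fstep W (cache, g, (g.length : Int)) c = (cache, g ++ [c], (g.length : Int) + 1) := by
        simp [fstep, hc]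
      have h2 := ih (g ++ [c]) cache (by simp) (by simp; omega)
      simp only [List.length_append, List.length_cons, List.length_nil] at h2
      push_cast at h2
      simp only [List.foldl_cons, hstep]
      rw [h2]
      simp

theorem aRight_eq (W : Int) (hW : 1 ≤ W) (rm : List Char) :
    aRight rm W = PySem.Chars.join ['_'] (chunks1 (W.toNat - 1) rm) := by
  cases rm with
  | nil => simp [aRight, chunks1]
  | cons c rest =>
    rw [aRight, if_neg (by simp)]
    have hstep : fstep W ([], [], 0) c = ([], [c], 1) := by
      simp [fstep]; omega
    have h2 := fwd_aux W hW rest [c] [] (by simp) (by simp; omega)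
    simp only [List.length_cons, List.length_nil] at h2
    push_cast at h2
    simp only [List.foldl_cons, hstep]
    simp only [List.nil_append] at h2
    rw [h2]
    simp

theorem bChunks_eq (W : Int) (hW : 1 ≤ W) :
    ∀ (fuel : Nat) (l : List Char), l.length < fuel →
    bChunks fuel l W = chunks1 (W.toNat - 1) l := by
  intro fuel
  induction fuel with
  | zero => intro l h; omega
  | succ f ih =>
    intro l h
    cases l with
    | nil => simp [bChunks, chunks1]
    | cons c r =>
      rw [bChunks, if_neg (by simp)]
      rw [PySem.List.slice_to (c :: r) (show (0:Int) ≤ W by omega),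
        PySem.List.slice_from (c :: r) (show (0:Int) ≤ W by omega)]
      have hWt : 1 ≤ W.toNat := by omega
      have hlen : (List.drop W.toNat (c :: r)).length < f := by
        simp only [List.length_drop, List.length_cons] at h ⊢; omega
      rw [ih _ hlen]
      rw [chunks1_ne (W.toNat - 1) (c :: r) (by simp)]
      have h1 : W.toNat - 1 + 1 = W.toNat := by omega
      rw [h1]

theorem rchunks_small (m : List Char) (h : m ≠ []) (h3 : m.length ≤ 3) : rchunks m = [m] := by
  rw [rchunks.eq_def]; simp [h, h3]

theorem rchunks_append3 (x g : List Char) (hx : x ≠ []) (hg : g.length = 3) :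
    rchunks (x ++ g) = rchunks x ++ [g] := by
  rw [rchunks.eq_def]
  have hlen : (x ++ g).length = x.length + 3 := by simp [hg]
  have hx1 : 0 < x.length := List.length_pos_iff.mpr hx
  rw [if_neg (by simp [hx]), if_neg (by omega)]
  have h4 : (x ++ g).length - 3 = x.length := by omega
  rw [h4, List.take_left, List.drop_left]

theorem rev_aux :
    ∀ (l g : List Char) (tidy : List (List Char)), g ≠ [] → g.length ≤ 3 →
    (if (l.foldl rstep (tidy, g, (g.length : Int))).2.1 ≠ [] then
        (l.foldl rstep (tidy, g, (g.length : Int))).2.1 :: (l.foldl rstep (tidy, g, (g.length : Int))).1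
      else (l.foldl rstep (tidy, g, (g.length : Int))).1) = rchunks (l.reverse ++ g) ++ tidy := by
  intro l
  induction l with
  | nil =>
    intro g tidy hg hgw
    simp only [List.foldl_nil, List.reverse_nil, List.nil_append]
    rw [rchunks_small g hg hgw]
    simp [hg]
  | cons c l ih =>
    intro g tidy hg hgw
    by_cases hfull : g.length = 3
    · have hc : ((g.length : Int)) = 3 := by omega
      have hstep : rstep (tidy, g, (g.length : Int)) c = (g :: tidy, [c], 1) := by
        simp [rstep, hc]
      have h2 := ih [c] (g :: tidy) (by simp) (by simp)
      simp only [List.length_cons, List.length_nil] at h2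
      push_cast at h2
      simp only [List.foldl_cons, hstep]
      rw [h2, List.reverse_cons]
      rw [rchunks_append3 (l.reverse ++ [c]) g (by simp) hfull]
      simp
    · have hc : ¬ ((g.length : Int) = 3) := by omega
      have hstep : rstep (tidy, g, (g.length : Int)) c = (tidy, c :: g, (g.length : Int) + 1) := by
        simp [rstep, hc]
      have h2 := ih (c :: g) tidy (by simp) (by simp; omega)
      simp only [List.length_cons] at h2
      push_cast at h2
      simp only [List.foldl_cons, hstep]
      rw [h2]
      simp

theorem chunks1_snoc (m : List Char) : 3 ∣ m.length → m ≠ [] →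
    chunks1 2 m = chunks1 2 (m.take (m.length - 3)) ++ [m.drop (m.length - 3)] := by
  induction hn : m.length using Nat.strong_induction_on generalizing m with
  | _ n ih =>
  intro hd hne
  subst hn
  have h0 : 0 < m.length := List.length_pos_iff.mpr hne
  by_cases h3 : m.length = 3
  · rw [chunks1_ne 2 m hne]
    rw [List.drop_of_length_le (by omega), List.take_of_length_le (by omega)]
    simp [h3, chunks1]
  · have h6 : 6 ≤ m.length := by omega
    rw [chunks1_ne 2 m hne]
    have hlen3 : (m.drop 3).length = m.length - 3 := by simp
    have ih1 := ih (m.drop 3).length (by omega) (m.drop 3) rfl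
      (by rw [hlen3]; omega) (by
        intro hc; apply_fun List.length at hc; simp at hc; omega)
    rw [ih1, hlen3]
    rw [chunks1_ne 2 (m.take (m.length - 3)) (by
      intro hc; apply_fun List.length at hc; simp at hc; omega)]
    rw [List.take_take, List.drop_take, List.drop_drop]
    have e1 : min (2 + 1) (m.length - 3) = 2 + 1 := by omega
    have e2 : m.length - 3 - 3 = m.length - 3 - (2 + 1) := by omega
    have e3 : 3 + (m.length - 3 - 3) = m.length - 3 := by omega
    rw [e1, e3, ← e2]
    simp

theorem rchunks_eq (d : List Char) :
    rchunks d = (if d.length % 3 ≠ 0 then [d.take (d.length % 3)] else []) ++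
      chunks1 2 (d.drop (d.length % 3)) := by
  induction hn : d.length using Nat.strong_induction_on generalizing d with
  | _ n ih =>
  subst hn
  by_cases hne : d = []
  · subst hne; simp [rchunks, chunks1]
  have h0 : 0 < d.length := List.length_pos_iff.mpr hne
  by_cases h3 : d.length ≤ 3
  · rw [rchunks_small d hne h3]
    by_cases he : d.length = 3
    · have hm : d.length % 3 = 0 := by omega
      rw [hm]
      simp only [ne_eq, not_true_eq_false, if_false, List.drop_zero]
      rw [chunks1_ne 2 d hne, List.take_of_length_le (by omega), List.drop_of_length_le (by omega)]
      simp [chunks1]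
    · have hr : d.length % 3 = d.length := Nat.mod_eq_of_lt (by omega)
      rw [hr, List.take_length, List.drop_length]
      simp [chunks1, hne]
  · rw [rchunks.eq_def]
    simp only [if_neg hne, if_neg h3]
    have hlt : (d.take (d.length - 3)).length = d.length - 3 := by simp
    have ih1 := ih (d.take (d.length - 3)).length (by rw [hlt]; omega) _ rfl
    rw [ih1, hlt]
    have hmod : (d.length - 3) % 3 = d.length % 3 := by omega
    rw [hmod]
    set r := d.length % 3 with hr
    have hrle : r ≤ d.length - 3 := by omega
    rw [List.take_take, List.drop_take]
    have e1 : min r (d.length - 3) = r := by omega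
    rw [e1]
    have hsn := chunks1_snoc (d.drop r) (by simp; omega) (by
      intro hc; apply_fun List.length at hc; simp at hc; omega)
    have hlen2 : (d.drop r).length = d.length - r := by simp
    rw [hlen2] at hsn
    have e2 : d.length - r - 3 = d.length - 3 - r := by omega
    rw [e2, List.drop_drop] at hsn
    have e3 : r + (d.length - 3 - r) = d.length - 3 := by omega
    rw [e3] at hsn
    rw [hsn, List.append_assoc]

theorem aTidyInt_eq (d : List Char) :
    aTidyInt d = (if d.headD ' ' = '-' then ['-'] else []) ++
      PySem.Chars.join ['_']
        ((if (d.dropWhile (fun c => c = '+' ∨ c = '-')).length % 3 ≠ 0 then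
            [(d.dropWhile (fun c => c = '+' ∨ c = '-')).take ((d.dropWhile (fun c => c = '+' ∨ c = '-')).length % 3)] else []) ++
          chunks1 2 ((d.dropWhile (fun c => c = '+' ∨ c = '-')).drop ((d.dropWhile (fun c => c = '+' ∨ c = '-')).length % 3))) := by
  rw [aTidyInt]
  set d2 := d.dropWhile (fun c => c = '+' ∨ c = '-') with hd2
  rw [← rchunks_eq d2]
  by_cases hd : d2 = []
  · rw [hd]
    by_cases hneg : d.head?.getD ' ' = '-' <;>
      simp [rchunks, List.headD_eq_head?_getD, hneg]
  · have hrevne : d2.reverse ≠ [] := by simpa using hd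
    obtain ⟨c, lrest, hrev⟩ : ∃ c lrest, d2.reverse = c :: lrest := by
      cases hx : d2.reverse with
      | nil => exact absurd hx hrevne
      | cons a b => exact ⟨a, b, rfl⟩
    rw [hrev]
    have hstep : rstep ([], [], 0) c = ([], [c], 1) := by simp [rstep]
    simp only [List.foldl_cons, hstep]
    have h2 := rev_aux lrest [c] [] (by simp) (by simp)
    simp only [List.length_cons, List.length_nil] at h2
    push_cast at h2
    simp only [List.append_nil] at h2
    rw [h2]
    have hd2eq : lrest.reverse ++ [c] = d2 := by
      have : (c :: lrest).reverse = d2.reverse.reverse := by rw [hrev]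
      simpa using this
    rw [hd2eq]
    by_cases hneg : d.head?.getD ' ' = '-' <;>
      simp [List.headD_eq_head?_getD, hneg]

theorem takeWhileE_map (t : List Char) :
    (t.map eToE).takeWhile (fun c => c ≠ 'E') = (t.takeWhile (fun c => c ≠ 'E' ∧ c ≠ 'e')).map eToE := by
  induction t with
  | nil => rfl
  | cons c r ih =>
    by_cases hE : c = 'E'
    · subst hE; simp [eToE]
    · by_cases he : c = 'e'
      · subst he; simp [eToE]
      · simp only [ne_eq, decide_not] at ih
        simp [eToE, hE, he, ih]

theorem dropWhileDot_map (x : List Char) :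
    (x.map eToE).dropWhile (fun c => c ≠ '.') = (x.dropWhile (fun c => c ≠ '.')).map eToE := by
  induction x with
  | nil => rfl
  | cons c r ih =>
    have hiff : eToE c = '.' ↔ c = '.' := by
      unfold eToE; split_ifs with h <;> simp_all
    by_cases hdot : c = '.'
    · subst hdot; simp [eToE]
    · have hne : ¬ (if c = 'e' then 'E' else c) = '.' := by
        intro h
        exact hdot (hiff.mp (by simpa [eToE] using h))
      simp only [ne_eq, decide_not] at ih
      simp [eToE, hne, hdot, ih]

theorem expStrip (e : List Char) :
    (if e ≠ [] ∧ e.headD ' ' = '+' then e.drop 1 else e) = (if e.take 1 = ['+'] then e.drop 1 else e) := by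
  cases e with
  | nil => simp
  | cons c r => by_cases h : c = '+' <;> simp [h]

theorem bChunks3 (dg : List Char) (r : Nat) :
    bChunks (dg.length + 1) (dg.drop r) 3 = chunks1 2 (dg.drop r) := by
  have h := bChunks_eq 3 (by norm_num) (dg.length + 1) (dg.drop r) (by simp only [List.length_drop]; omega)
  rw [show ((3:Int).toNat - 1) = 2 from rfl] at h
  exact h

theorem rightPart (rm : List Char) (W : Int) (hW : 1 ≤ W) :
    aRight rm W = PySem.Chars.join ['_'] (bChunks (rm.length + 1) rm W) := by
  rw [aRight_eq W hW, bChunks_eq W hW (rm.length + 1) rm (by omega)]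

theorem takeWhile_self_of_not_mem (m : List Char) (e : Char) (h : e ∉ m) :
    m.takeWhile (fun c => c ≠ e) = m := by
  rw [List.takeWhile_eq_self_iff]
  intro x hx
  simpa using fun (he : x = e) => h (he ▸ hx)

theorem dropWhile_nil_of_not_mem (m : List Char) (e : Char) (h : e ∉ m) :
    m.dropWhile (fun c => c ≠ e) = [] := by
  rw [List.dropWhile_eq_nil_iff]
  intro x hx
  simpa using fun (he : x = e) => h (he ▸ hx)

-- ===== VERDICT (by name: the statement is the Claim_ definition above) =====
theorem tidy_up_float_spec : Claim_equal_tidy_up_float := by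
  unfold Claim_equal_tidy_up_float
  intro s width _hdom hpre
  unfold Spec_tidy_up_float
  simp only [tidy_up_float, tidy_up_float_alt]
  by_cases hbad : (s.toList.any fun c => decide (c ∉ pvWL)) = true
  · rw [if_pos hbad, if_pos hbad]
  · rw [if_neg hbad, if_neg hbad]
    have hall : ∀ c ∈ s.toList, c ∈ pvWL := by
      intro c hc
      by_contra hcn
      exact hbad (List.any_eq_true.mpr ⟨c, hc, by simpa using hcn⟩)
    have hw : 1 ≤ width ∨
        (((s.toList.takeWhile (fun c => c ≠ 'E' ∧ c ≠ 'e')).dropWhile (fun c => c ≠ '.')).drop 1) = [] := by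
      rcases hpre with h | ⟨_, hw⟩
      · exact absurd h hbad
      · exact hw
    rw [prep_eq _ hall]
    rw [splitE 'E' (s.toList.map eToE)]
    congr 1
    by_cases hE : 'E' ∈ s.toList.map eToE
    · rw [if_pos hE]
      simp only [List.headD_cons, List.length_cons, List.length_nil, Nat.reduceAdd, reduceIte,
        List.getD_cons_succ, List.getD_cons_zero]
      rw [splitE '.' (List.takeWhile (fun c => c ≠ 'E') (List.map eToE s.toList))]
      by_cases hdot : '.' ∈ List.takeWhile (fun c => c ≠ 'E') (List.map eToE s.toList)
      · rw [if_pos hdot]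
        simp only [List.headD_cons, List.length_cons, List.length_nil, Nat.reduceAdd, reduceIte,
          List.getD_cons_succ, List.getD_cons_zero]
        rw [aTidyInt_eq, bChunks3, expStrip]
        have hbridge : List.drop 1 (List.dropWhile (fun c => decide (c ≠ '.'))
              (List.takeWhile (fun c => decide (c ≠ 'E')) (List.map eToE s.toList))) =
            List.map eToE (List.drop 1 (List.dropWhile (fun c => decide (c ≠ '.'))
              (List.takeWhile (fun c => decide (c ≠ 'E' ∧ c ≠ 'e')) s.toList))) := by
          rw [takeWhileE_map, dropWhileDot_map, ← List.map_drop]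
        by_cases hrm : List.drop 1 (List.dropWhile (fun c => decide (c ≠ '.'))
            (List.takeWhile (fun c => decide (c ≠ 'E')) (List.map eToE s.toList))) = []
        · simp only [hrm, ne_eq, not_true_eq_false, if_false, List.append_assoc]
        · have hW : 1 ≤ width := by
            rcases hw with h | h
            · exact h
            · exact absurd (by rw [hbridge, h]; rfl) hrm
          rw [rightPart _ width hW]
      · rw [if_neg hdot]
        simp only [List.headD_cons, List.length_cons, List.length_nil, Nat.reduceAdd]
        rw [dropWhile_nil_of_not_mem _ '.' hdot]
        rw [takeWhile_self_of_not_mem _ '.' hdot]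
        rw [aTidyInt_eq, bChunks3, expStrip]
        simp [List.append_assoc]
    · rw [if_neg hE]
      simp only [List.headD_cons, List.length_cons, List.length_nil, Nat.reduceAdd]
      rw [dropWhile_nil_of_not_mem _ 'E' hE, takeWhile_self_of_not_mem _ 'E' hE]
      have h12 : ¬ (1 = 2) := by decide
      simp only [if_neg h12, List.drop_nil, List.take_nil, ne_eq, not_true_eq_false, false_and,
        if_false, List.append_nil]
      rw [splitE '.' (List.map eToE s.toList)]
      simp only [ne_eq]
      simp only [ne_eq] at hw
      have htw : List.takeWhile (fun c => decide (¬c = 'E' ∧ ¬c = 'e')) s.toList = s.toList := by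
        rw [List.takeWhile_eq_self_iff]
        intro x hx
        have hxE : eToE x ≠ 'E' := fun hEq => hE (hEq ▸ List.mem_map_of_mem hx)
        by_cases hxe : x = 'e'
        · exact absurd (by simp [eToE, hxe]) hxE
        · by_cases hxE2 : x = 'E'
          · exact absurd (by simp [eToE, hxE2]) hxE
          · simp [hxe, hxE2]
      rw [htw] at hw
      have hdm := dropWhileDot_map s.toList
      simp only [ne_eq] at hdm
      by_cases hdot : '.' ∈ List.map eToE s.toList
      · rw [if_pos hdot]
        simp only [List.headD_cons, List.length_cons, List.length_nil, Nat.reduceAdd, reduceIte,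
          List.getD_cons_succ, List.getD_cons_zero]
        rw [aTidyInt_eq, bChunks3]
        have hbridge : List.drop 1 (List.dropWhile (fun c => decide ¬c = '.') (List.map eToE s.toList)) =
            List.map eToE (List.drop 1 (List.dropWhile (fun c => decide ¬c = '.') s.toList)) := by
          rw [hdm, ← List.map_drop]
        by_cases hrm : List.drop 1 (List.dropWhile (fun c => decide ¬c = '.') (List.map eToE s.toList)) = []
        · simp only [hrm, ne_eq, not_true_eq_false, if_false, List.append_assoc]
          simp
        · have hW : 1 ≤ width := by
            rcases hw with h | h
            · exact h
            · exact absurd (by rw [hbridge, h]; rfl) hrm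
          rw [rightPart _ width hW]
          simp [List.append_assoc]
      · rw [if_neg hdot]
        have h12b : ¬ (1 = 2) := by decide
        simp only [List.headD_cons, List.length_cons, List.length_nil, Nat.reduceAdd,
          if_neg h12b]
        have hds := dropWhile_nil_of_not_mem (List.map eToE s.toList) '.' hdot
        have hts := takeWhile_self_of_not_mem (List.map eToE s.toList) '.' hdot
        simp only [ne_eq] at hds hts
        rw [hds, hts, aTidyInt_eq, bChunks3]
        simp
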